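-- pv_equiv track=rewrite | github.com/ange1inaxu/dfs-meeting-point | dfs_meeting_point.py | find_meeting_point
-- ===== SOURCE A (Python) =====
-- def dfs(Adj, s, parent = None, order = None):
--     if parent is None:
--         parent = [None for v in Adj]
--         order = []
--         parent[s] = s
--     for v in Adj[s]:
--         if parent[v] is None:
--             parent[v] = s
--             dfs(Adj, v, parent, order)
--     order.append(s)
--     return parent, order
--
-- def full_dfs(Adj):
--     parent = [None for v in Adj]
--     order = []
--     for v in range(len(Adj)):
--         if parent[v] is None:
--             parent[v] = v
--             dfs(Adj, v, parent, order)
--     return parent, order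
--
-- def find_meeting_point(Adj):
--     '''
--     inputs:
--         Adj - an adjacency list such as [[1,2], [2], []]
--     return a meeting point or None if no meeting points exist
--     '''
--     new_adj = [[] for i in range(len(Adj))]
--     for i in range(len(Adj)):
--         for elt in Adj[i]:
--             new_adj[elt].append(i)
--
--     parent, order = full_dfs(new_adj)
--     last_num = max(order)
--     for i, elt in enumerate(order):
--         if elt == last_num:
--             index = i
--
--     parent, order = dfs(new_adj, index, parent = None, order = None)
--
--     if parent.count(None) > 0:
--         return None
--
--     return index
-- ===== SOURCE B (Python) =====
-- def find_meeting_point(Adj):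
--     '''
--     inputs:
--         Adj - an adjacency list such as [[1,2], [2], []]
--     return a meeting point or None if no meeting points exist
--     '''
--     n = len(Adj)
--     new_adj = [[] for i in range(n)]
--     for i in range(n):
--         for elt in Adj[i]:
--             new_adj[elt].append(i)
--
--     def iter_dfs(s, parent, order):
--         # explicit-stack DFS: frames hold (vertex, next-neighbor index);
--         # a vertex is appended to order when its neighbor list is exhausted
--         stack = [(s, 0)]
--         while stack:
--             u, i = stack[-1]
--             if i < len(new_adj[u]):
--                 stack[-1] = (u, i + 1)
--                 v = new_adj[u][i]
--                 if parent[v] is None: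
--                     parent[v] = u
--                     stack.append((v, 0))
--             else:
--                 stack.pop()
--                 order.append(u)
--
--     parent = [None] * n
--     order = []
--     for r in range(n):
--         if parent[r] is None:
--             parent[r] = r
--             iter_dfs(r, parent, order)
--
--     m = max(order)
--     index = len(order) - 1 - order[::-1].index(m)
--
--     parent = [None] * n
--     parent[index] = index
--     iter_dfs(index, parent, [])
--
--     return None if None in parent else index
-- ===== Notes on version B (the rewrite author's own statement) =====
-- stated objective: alternative
-- what changed: The recursive DFS (helper `dfs` calling itself per neighbor) is replaced by an explicit-stack iterative DFS whose frames carry a saved neighbor index, reproducing the same discovery-time parent assignments and postorder finish list without Python recursion; the last-index-of-max scan becomes reversed-list .index arithmetic and the final parent check becomes a membership test.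
-- outside the precondition, e.g. on find_meeting_point([]): A raises ValueError, B raises ValueError
import Mathlib
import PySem

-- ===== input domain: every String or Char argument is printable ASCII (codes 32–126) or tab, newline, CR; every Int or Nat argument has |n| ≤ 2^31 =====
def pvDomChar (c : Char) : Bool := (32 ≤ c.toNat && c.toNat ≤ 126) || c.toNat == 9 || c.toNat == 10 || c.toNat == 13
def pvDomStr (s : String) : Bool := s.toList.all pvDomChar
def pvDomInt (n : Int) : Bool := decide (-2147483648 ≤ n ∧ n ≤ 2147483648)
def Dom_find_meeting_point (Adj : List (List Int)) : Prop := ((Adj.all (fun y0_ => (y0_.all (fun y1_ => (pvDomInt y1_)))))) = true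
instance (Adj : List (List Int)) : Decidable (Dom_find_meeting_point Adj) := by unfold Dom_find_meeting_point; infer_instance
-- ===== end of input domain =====

-- B replaces A's recursive DFS by an explicit-stack iterative DFS with saved neighbor
-- indices (same parent assignments and postorder); return values only, nothing is mutated
-- that a caller could observe (A and B both only mutate lists they create themselves).

-- number of None entries of a Python parent list
def nNone (p : List (Option Int)) : Nat := p.countP (·.isNone)

lemma nNone_set_lt (p : List (Option Int)) (k : Nat) (x : Int)
    (hk : k < p.length) (h : p.getD k none = none) :
    nNone (p.set k (some x)) < nNone p := by
  induction p generalizing k with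
  | nil => simp at hk
  | cons a t ih =>
    cases k with
    | zero =>
      simp [List.getD] at h
      subst h
      simp [nNone, List.countP_cons]
    | succ k =>
      simp at hk
      simp [List.getD] at h
      have := ih k hk h
      cases a <;> simp [nNone] at * <;> omega

-- ===== PORT A =====
-- new_adj[elt].append(i)  (Python negative indices wrap; out-of-range is IndexError, excluded by Pre_)
def pyAppendAt (xs : List (List Int)) (idx : Int) (x : Int) : List (List Int) :=
  let j : Int := if idx < 0 then idx + (xs.length : Int) else idx
  if 0 ≤ j ∧ j.toNat < xs.length then xs.set j.toNat (xs.getD j.toNat [] ++ [x]) else xs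

-- the transpose-building double loop shared verbatim by A and Source B
def pyTranspose (Adj : List (List Int)) : List (List Int) :=
  (List.range Adj.length).foldl
    (fun acc i => (Adj.getD i []).foldl (fun acc2 elt => pyAppendAt acc2 elt i) acc)
    (List.replicate Adj.length [])

-- Adj[s] (s is always a valid vertex id in every call the ports make inside Pre_)
def rowOf (Adj : List (List Int)) (s : Int) : List Int :=
  if 0 ≤ s ∧ s.toNat < Adj.length then Adj.getD s.toNat [] else []

mutual
-- the body of Python's dfs(Adj, s, parent, order) after the init block: neighbor loop, then order.append(s)
def dfsRecA (Adj : List (List Int)) : Nat → Int → List (Option Int) → List Int → List (Option Int) × List Int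
  | 0, _, p, o => (p, o)
  | f+1, s, p, o =>
    ((dfsLoopA Adj f s (rowOf Adj s) p o).1, (dfsLoopA Adj f s (rowOf Adj s) p o).2 ++ [s])
  termination_by f => (f, 1)

-- for v in Adj[s]: if parent[v] is None: parent[v] = s; dfs(Adj, v, parent, order)
def dfsLoopA (Adj : List (List Int)) : Nat → Int → List Int → List (Option Int) → List Int → List (Option Int) × List Int
  | _, _, [], p, o => (p, o)
  | f, s, v :: vs, p, o =>
    if 0 ≤ v ∧ v.toNat < p.length ∧ p.getD v.toNat none = none then
      dfsLoopA Adj f s vs (dfsRecA Adj f v (p.set v.toNat (some s)) o).1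
        (dfsRecA Adj f v (p.set v.toNat (some s)) o).2
    else dfsLoopA Adj f s vs p o
  termination_by f _ vs => (f, vs.length + 2)
end

def find_meeting_point (Adj : List (List Int)) : Option Int :=
  let n := Adj.length
  let newAdj := pyTranspose Adj
  -- full_dfs(new_adj)
  let st := (List.range n).foldl
    (fun (st : List (Option Int) × List Int) r =>
      if st.1.getD r none = none then
        dfsRecA newAdj ((st.1.set r (some (r : Int))).length + 1) (r : Int) (st.1.set r (some (r : Int))) st.2
      else st)
    (List.replicate n (none : Option Int), ([] : List Int))
  let order := st.2
  -- last_num = max(order); for i, elt in enumerate(order): if elt == last_num: index = i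
  let last := (PySem.List.max? order (fun x => x)).getD 0
  let idxOpt := (PySem.List.enumerate order 0).foldl
      (fun acc pr => if pr.2 = last then some pr.1 else acc) (none : Option Int)
  match idxOpt with
  | none => none
  | some ix =>
    -- dfs(new_adj, index): parent = [None]*n; parent[index] = index; then the dfs body
    let p0 := if 0 ≤ ix ∧ ix.toNat < n then (List.replicate n (none : Option Int)).set ix.toNat (some ix)
              else List.replicate n (none : Option Int)
    let pf := (dfsRecA newAdj (p0.length + 1) ix p0 []).1
    if PySem.List.count pf none > 0 then none else some ix

-- ===== PORT B =====
-- iter_dfs: explicit stack of (vertex, next neighbor index) frames; pop appends to order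
def runB (Adj : List (List Int)) : List (Int × Nat) → List (Option Int) → List Int → List (Option Int) × List Int
  | [], p, o => (p, o)
  | (s, i) :: rest, p, o =>
    if h1 : i < (rowOf Adj s).length then
      if h2 : 0 ≤ (rowOf Adj s).getD i 0 ∧ ((rowOf Adj s).getD i 0).toNat < p.length ∧
          p.getD ((rowOf Adj s).getD i 0).toNat none = none then
        runB Adj (((rowOf Adj s).getD i 0, 0) :: (s, i + 1) :: rest)
          (p.set ((rowOf Adj s).getD i 0).toNat (some s)) o
      else runB Adj ((s, i + 1) :: rest) p o
    else runB Adj rest p (o ++ [s])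
  termination_by stack p _ => (nNone p, (stack.map (fun fr => (rowOf Adj fr.1).length - fr.2)).sum + stack.length)
  decreasing_by
  · exact Prod.Lex.left _ _ (nNone_set_lt p _ s h2.2.1 h2.2.2)
  · apply Prod.Lex.right; simp; omega
  · apply Prod.Lex.right; simp; omega

def find_meeting_point_alt (Adj : List (List Int)) : Option Int :=
  let n := Adj.length
  let newAdj := pyTranspose Adj
  let st := (List.range n).foldl
    (fun (st : List (Option Int) × List Int) r =>
      if st.1.getD r none = none then
        runB newAdj [((r : Int), 0)] (st.1.set r (some (r : Int))) st.2
      else st)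
    (List.replicate n (none : Option Int), ([] : List Int))
  let order := st.2
  -- m = max(order); index = len(order) - 1 - order[::-1].index(m)
  let m := (PySem.List.max? order (fun x => x)).getD 0
  match PySem.List.index? order.reverse m with
  | none => none
  | some k =>
    let ix : Int := (order.length : Int) - 1 - (k : Int)
    let p0 := if 0 ≤ ix ∧ ix.toNat < n then (List.replicate n (none : Option Int)).set ix.toNat (some ix)
              else List.replicate n (none : Option Int)
    let pf := (runB newAdj [(ix, 0)] p0 []).1
    if pf.contains none then none else some ix

-- ===== PRECONDITION & SPEC =====
-- Pre_ excludes exactly the inputs on which Python A raises: Adj = [] (max() of the empty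
-- order raises ValueError) and any edge endpoint outside [-len(Adj), len(Adj)) (IndexError).
def Pre_find_meeting_point (Adj : List (List Int)) : Prop :=
  Adj ≠ [] ∧ ∀ row ∈ Adj, ∀ e ∈ row, -(Adj.length : Int) ≤ e ∧ e < (Adj.length : Int)
instance (Adj : List (List Int)) : Decidable (Pre_find_meeting_point Adj) := by
  unfold Pre_find_meeting_point; infer_instance

def pvWitness_find_meeting_point : List (List Int) := [[1], [0]]

def Spec_find_meeting_point (Adj : List (List Int)) (out : Option Int) : Prop := out = find_meeting_point_alt Adj
instance (Adj : List (List Int)) (out : Option Int) : Decidable (Spec_find_meeting_point Adj out) := by unfold Spec_find_meeting_point; infer_instance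

-- ===== CLAIM (what is proved, stated in full; the proofs are below) =====
def Claim_equal_find_meeting_point : Prop := ∀ (Adj : List (List Int)), Dom_find_meeting_point Adj → Pre_find_meeting_point Adj → Spec_find_meeting_point Adj (find_meeting_point Adj)

-- ===== LEMMAS AND PROOFS =====

lemma nNone_set_le (p : List (Option Int)) (k : Nat) (x : Int) :
    nNone (p.set k (some x)) ≤ nNone p := by
  induction p generalizing k with
  | nil => simp [nNone]
  | cons a t ih =>
    cases k with
    | zero => cases a <;> simp [nNone] <;> omega
    | succ k =>
      have := ih k
      cases a <;> simp [nNone] at * <;> omega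


lemma dfsLoopA_mono (N : List (List Int)) (f : Nat)
    (hrec : ∀ s p o, (dfsRecA N f s p o).1.length = p.length ∧ nNone (dfsRecA N f s p o).1 ≤ nNone p) :
    ∀ vs s p o, (dfsLoopA N f s vs p o).1.length = p.length ∧ nNone (dfsLoopA N f s vs p o).1 ≤ nNone p := by
  intro vs
  induction vs with
  | nil => intro s p o; simp [dfsLoopA]
  | cons v t ih =>
    intro s p o
    rw [dfsLoopA]
    split
    · have h1 := hrec v (p.set v.toNat (some s)) o
      have h2 := ih s (dfsRecA N f v (p.set v.toNat (some s)) o).1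
        (dfsRecA N f v (p.set v.toNat (some s)) o).2
      have h3 := nNone_set_le p v.toNat s
      refine ⟨?_, ?_⟩
      · rw [h2.1, h1.1, List.length_set]
      · omega
    · exact ih s p o

lemma dfsRecA_mono (N : List (List Int)) :
    ∀ f s p o, (dfsRecA N f s p o).1.length = p.length ∧ nNone (dfsRecA N f s p o).1 ≤ nNone p := by
  intro f
  induction f with
  | zero => intro s p o; simp [dfsRecA]
  | succ f ih =>
    intro s p o
    rw [dfsRecA]
    exact dfsLoopA_mono N f ih (rowOf N s) s p o

-- the explicit-stack machine finishes the top frame exactly like A's recursive neighbor loop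
lemma runB_frame (N : List (List Int)) :
    ∀ f : Nat, ∀ d : List Int, ∀ (s : Int) (i : Nat) (rest : List (Int × Nat)) (p : List (Option Int)) (o : List Int),
      (rowOf N s).drop i = d → nNone p ≤ f →
      runB N ((s, i) :: rest) p o =
        runB N rest (dfsLoopA N f s d p o).1 ((dfsLoopA N f s d p o).2 ++ [s]) := by
  intro f
  induction f using Nat.strong_induction_on with
  | _ f ihf =>
    intro d
    induction d with
    | nil =>
      intro s i rest p o hd hf
      have hi : (rowOf N s).length ≤ i := by
        by_contra hcon
        have := List.drop_eq_getElem_cons (l := rowOf N s) (show i < (rowOf N s).length by omega)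
        rw [hd] at this
        cases this
      have hni : ¬ i < (rowOf N s).length := by omega
      rw [runB, dif_neg hni, dfsLoopA]
    | cons v d' ihd =>
      intro s i rest p o hd hf
      have hi : i < (rowOf N s).length := by
        rcases Nat.lt_or_ge i (rowOf N s).length with h | h
        · exact h
        · rw [List.drop_eq_nil_of_le h] at hd; cases hd
      have hcons := List.drop_eq_getElem_cons hi
      rw [hd] at hcons
      injection hcons with hv hd'
      have hgd : (rowOf N s).getD i 0 = v := by
        rw [List.getD_eq_getElem _ _ hi]; exact hv.symm
      rw [runB, dif_pos hi, hgd]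
      by_cases hc : 0 ≤ v ∧ v.toNat < p.length ∧ p.getD v.toNat none = none
      · rw [dif_pos hc]
        have hn1 : 0 < nNone p := by
          refine List.countP_pos_iff.mpr ⟨p[v.toNat]'hc.2.1, List.getElem_mem _, ?_⟩
          rw [← List.getD_eq_getElem p none hc.2.1, hc.2.2]
          rfl
        cases f with
        | zero => omega
        | succ f' =>
          have hset : nNone (p.set v.toNat (some s)) < nNone p :=
            nNone_set_lt p v.toNat s hc.2.1 hc.2.2
          rw [ihf f' (Nat.lt_succ_self f') (rowOf N v) v 0 ((s, i + 1) :: rest)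
            (p.set v.toNat (some s)) o List.drop_zero (by omega)]
          have hmono := (dfsLoopA_mono N f' (dfsRecA_mono N f') (rowOf N v) v
            (p.set v.toNat (some s)) o).2
          rw [ihd s (i + 1) rest _ _ hd'.symm (by omega)]
          rw [dfsLoopA, if_pos hc, dfsRecA]
      · rw [dif_neg hc]
        rw [ihd s (i + 1) rest p o hd'.symm hf]
        rw [dfsLoopA, if_neg hc]

lemma runB_eq_dfsRecA (N : List (List Int)) (s : Int) (p : List (Option Int)) (o : List Int) :
    runB N [(s, 0)] p o = dfsRecA N (p.length + 1) s p o := by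
  have hle : nNone p ≤ p.length := List.countP_le_length
  rw [runB_frame N p.length (rowOf N s) s 0 [] p o List.drop_zero hle]
  simp only [runB, dfsRecA]

lemma phase1_eq (N : List (List Int)) :
    ∀ (l : List Nat) (st : List (Option Int) × List Int),
      l.foldl (fun (st : List (Option Int) × List Int) r =>
        if st.1.getD r none = none then
          dfsRecA N ((st.1.set r (some (r : Int))).length + 1) (r : Int) (st.1.set r (some (r : Int))) st.2
        else st) st
      = l.foldl (fun (st : List (Option Int) × List Int) r =>
        if st.1.getD r none = none then
          runB N [((r : Int), 0)] (st.1.set r (some (r : Int))) st.2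
        else st) st := by
  intro l
  induction l with
  | nil => intro st; rfl
  | cons r t ih =>
    intro st
    have hstep : (if st.1.getD r none = none then
          dfsRecA N ((st.1.set r (some (r : Int))).length + 1) (r : Int) (st.1.set r (some (r : Int))) st.2
        else st)
        = (if st.1.getD r none = none then
          runB N [((r : Int), 0)] (st.1.set r (some (r : Int))) st.2
        else st) := by
      split
      · rw [runB_eq_dfsRecA]
      · rfl
    rw [List.foldl_cons, List.foldl_cons, ← hstep]
    exact ih _

lemma enumerate_append_singleton (xs : List Int) (a : Int) (s : Int) :
    PySem.List.enumerate (xs ++ [a]) s = PySem.List.enumerate xs s ++ [(s + (xs.length : Int), a)] := by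
  induction xs generalizing s with
  | nil => simp [PySem.List.enumerate_cons, PySem.List.enumerate_nil]
  | cons a' t ih =>
    rw [List.cons_append, PySem.List.enumerate_cons, ih, PySem.List.enumerate_cons]
    simp only [List.cons_append, List.length_cons]
    congr 3
    push_cast
    ring

-- A's "last index of the max" scan = B's reversed-list .index arithmetic
lemma lastIdx_eq_revIdx (l : List Int) (x : Int) :
    (PySem.List.enumerate l 0).foldl (fun acc pr => if pr.2 = x then some pr.1 else acc) (none : Option Int)
    = (PySem.List.index? l.reverse x).map (fun k : Nat => (l.length : Int) - 1 - (k : Int)) := by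
  induction l using List.reverseRecOn with
  | nil => simp [PySem.List.enumerate_nil]
  | append_singleton t a ih =>
    rw [enumerate_append_singleton, List.foldl_append, List.foldl_cons, List.foldl_nil,
      List.reverse_append, List.reverse_singleton, List.singleton_append]
    dsimp only
    by_cases hax : a = x
    · subst hax
      rw [if_pos rfl, PySem.List.index?_cons_self]
      simp only [Option.map_some]
      congr 1
      push_cast [List.length_append, List.length_cons, List.length_nil]
      ring
    · rw [if_neg hax, PySem.List.index?_cons_of_ne _ hax, ih, Option.map_map]
      cases hidx : PySem.List.index? t.reverse x
      · simp
      · simp only [Option.map_some, Function.comp_apply]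
        congr 1
        push_cast [List.length_append, List.length_cons, List.length_nil]
        ring

lemma count_pos_iff_contains (pf : List (Option Int)) :
    (PySem.List.count pf (none : Option Int) > 0) ↔ pf.contains none = true := by
  rw [PySem.List.count_eq]
  constructor
  · intro h
    exact List.elem_eq_true_of_mem (List.count_pos_iff.mp h)
  · intro h
    exact List.count_pos_iff.mpr (List.mem_of_elem_eq_true h)

lemma phase2_eq (N : List (List Int)) (ix : Int) (p0 : List (Option Int)) :
    (if PySem.List.count (dfsRecA N (p0.length + 1) ix p0 []).1 (none : Option Int) > 0
      then (none : Option Int) else some ix)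
    = (if ((runB N [(ix, 0)] p0 []).1).contains none then none else some ix) := by
  rw [runB_eq_dfsRecA]
  by_cases h : ((dfsRecA N (p0.length + 1) ix p0 []).1).contains none
  · rw [if_pos h, if_pos ((count_pos_iff_contains _).mpr h)]
  · rw [if_neg h, if_neg (fun hc => h ((count_pos_iff_contains _).mp hc))]

lemma tail_eq (N : List (List Int)) (n : Nat) (order : List Int) :
    (match (PySem.List.enumerate order 0).foldl
        (fun acc pr => if pr.2 = (PySem.List.max? order (fun x => x)).getD 0 then some pr.1 else acc)
        (none : Option Int) with
     | none => (none : Option Int)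
     | some ix =>
       if PySem.List.count
           (dfsRecA N
             ((if 0 ≤ ix ∧ ix.toNat < n then (List.replicate n (none : Option Int)).set ix.toNat (some ix)
               else List.replicate n (none : Option Int)).length + 1)
             ix
             (if 0 ≤ ix ∧ ix.toNat < n then (List.replicate n (none : Option Int)).set ix.toNat (some ix)
               else List.replicate n (none : Option Int))
             []).1 (none : Option Int) > 0
       then none else some ix)
    = (match PySem.List.index? order.reverse ((PySem.List.max? order (fun x => x)).getD 0) with
     | none => (none : Option Int)
     | some k =>
       if ((runB N [((order.length : Int) - 1 - (k : Int), 0)]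
             (if 0 ≤ (order.length : Int) - 1 - (k : Int) ∧ ((order.length : Int) - 1 - (k : Int)).toNat < n
               then (List.replicate n (none : Option Int)).set ((order.length : Int) - 1 - (k : Int)).toNat
                 (some ((order.length : Int) - 1 - (k : Int)))
               else List.replicate n (none : Option Int))
             []).1).contains none
       then none else some ((order.length : Int) - 1 - (k : Int))) := by
  rw [lastIdx_eq_revIdx]
  cases hidx : PySem.List.index? order.reverse ((PySem.List.max? order (fun x => x)).getD 0) with
  | none => simp
  | some k =>
    simp only [Option.map_some]
    exact phase2_eq N ((order.length : Int) - 1 - (k : Int)) _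

lemma main_eq (Adj : List (List Int)) : find_meeting_point Adj = find_meeting_point_alt Adj := by
  simp only [find_meeting_point, find_meeting_point_alt]
  rw [phase1_eq]
  exact tail_eq (pyTranspose Adj) Adj.length _

-- ===== VERDICT (by name: the statement is the Claim_ definition above) =====
theorem find_meeting_point_spec : Claim_equal_find_meeting_point := by
  intro Adj _ _
  unfold Spec_find_meeting_point
  exact main_eq Adj
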